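-- pv_equiv track=rewrite | github.com/tgstation/tgstation | tools/vv_explorer.py | generate_annotated_type_tree
-- ===== SOURCE A (Python) =====
-- Typepath = str
--
-- Variable = str
--
-- MANUAL_PARENT_TYPES = {
--     "/area": "/atom",
--     "/turf": "/atom",
--     "/obj": "/atom/movable",
--     "/mob": "/atom/movable",
--     "/atom": "/datum",
--     "/client": "/datum",
-- }
--
-- def get_parent_tree(typepath: Typepath) -> list[Typepath]:
--     tree = [typepath]
--     while True:
--         if typepath in MANUAL_PARENT_TYPES:
--             typepath = MANUAL_PARENT_TYPES[typepath]
--         else: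
--             parts = typepath.split("/")
--             typepath = "/".join(parts[:-1])
--
--         if not typepath:
--             break
--
--         tree.append(typepath)
--     return tree
--
-- def generate_annotated_type_tree(
--     typepaths: dict[Typepath, list[Variable]]
-- ) -> dict[Typepath, dict[Variable, list[Typepath]]]:
--     type_tree = {}
--
--     for typepath, variables in typepaths.items():
--         type_tree[typepath] = {}
--
--         parent_tree = get_parent_tree(typepath)
--         for parent_typepath in parent_tree:
--             type_tree[typepath][parent_typepath] = typepaths.get(parent_typepath, [])
--
--     return type_tree
-- ===== SOURCE B (Python) =====
-- Typepath = str
--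
-- Variable = str
--
-- MANUAL_PARENT_TYPES = {
--     "/area": "/atom",
--     "/turf": "/atom",
--     "/obj": "/atom/movable",
--     "/mob": "/atom/movable",
--     "/atom": "/datum",
--     "/client": "/datum",
-- }
--
--
-- def parent_of(typepath: Typepath) -> Typepath:
--     if typepath in MANUAL_PARENT_TYPES:
--         return MANUAL_PARENT_TYPES[typepath]
--     return "/".join(typepath.split("/")[:-1])
--
--
-- def generate_annotated_type_tree(
--     typepaths: dict[Typepath, list[Variable]]
-- ) -> dict[Typepath, dict[Variable, list[Typepath]]]:
--     def ann(path: Typepath) -> dict[Typepath, list[Typepath]]: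
--         parent = parent_of(path)
--         if parent:
--             return {path: typepaths.get(path, []), **ann(parent)}
--         return {path: typepaths.get(path, [])}
--
--     return {typepath: ann(typepath) for typepath in typepaths}
-- ===== Notes on version B (the rewrite author's own statement) =====
-- stated objective: simpler
-- what changed: Replaces A's explicit while-loop that materialises the full ancestor list plus a second insertion loop with a single recursive helper ann(path) that builds each type's annotation dict bottom-up by dict-unpacking the parent's annotation, with no intermediate list.
import Mathlib
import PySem

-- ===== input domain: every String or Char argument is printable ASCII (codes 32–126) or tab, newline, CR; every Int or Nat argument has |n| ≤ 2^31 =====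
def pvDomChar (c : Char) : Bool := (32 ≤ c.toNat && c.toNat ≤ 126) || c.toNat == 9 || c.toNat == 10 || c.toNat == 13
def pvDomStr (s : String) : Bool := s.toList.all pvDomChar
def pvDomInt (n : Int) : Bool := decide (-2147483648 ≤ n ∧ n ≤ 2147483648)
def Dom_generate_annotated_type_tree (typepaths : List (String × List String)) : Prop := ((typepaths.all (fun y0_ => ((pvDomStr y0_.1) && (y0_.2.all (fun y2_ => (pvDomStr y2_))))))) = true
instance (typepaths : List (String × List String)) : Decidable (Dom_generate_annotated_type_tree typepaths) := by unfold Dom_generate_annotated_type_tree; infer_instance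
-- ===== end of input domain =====

-- B replaces A's while-loop (materialise the ancestor list, then a second insert loop) by one
-- recursive helper building each annotation dict from the parent's dict; same cost, simpler shape.

-- Shared module context: the MANUAL_PARENT_TYPES constant and the parent step both Pythons perform
-- (A inline in its while loop, B in its helper parent_of — the identical membership test and split/join).
def manualParents : PySem.Dict String String :=
  PySem.Dict.ofList
    [("/area", "/atom"), ("/turf", "/atom"), ("/obj", "/atom/movable"),
     ("/mob", "/atom/movable"), ("/atom", "/datum"), ("/client", "/datum")]

-- one parent step: MANUAL_PARENT_TYPES[tp] if present, else "/".join(tp.split("/")[:-1])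
-- (parts[:-1] is List.dropLast — exact for every list)
def parentStep (typepath : String) : String :=
  match manualParents.get? typepath with
  | some v => v
  | none => PySem.Str.join "/" ((PySem.Str.split? typepath "/").getD []).dropLast  -- split? is some: sep "/" ≠ ""

-- typepaths.get(p, []) — dict lookup on the association list (first match)
def lookupTP (typepaths : List (String × List String)) (p : String) : List String :=
  ((typepaths.find? (fun kv => kv.1 == p)).map (·.2)).getD []

-- ===== PORT A =====
-- A's 'while True' loop; the fuel len+16 only totalises it (the chain shortens the path except at
-- the six manual steps, so it is never exhausted on real runs)
def gptLoop : Nat → String → List String → List String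
  | 0, _, tree => tree
  | fuel + 1, typepath, tree =>
    let typepath' := parentStep typepath
    if typepath' = "" then tree
    else gptLoop fuel typepath' (tree ++ [typepath'])

def get_parent_tree (typepath : String) : List String :=
  gptLoop ((PySem.Str.len typepath).toNat + 16) typepath [typepath]

def generate_annotated_type_tree (typepaths : List (String × List String)) : List (String × List (String × List String)) :=
  (typepaths.foldl
    (fun type_tree kv =>
      let parent_tree := get_parent_tree kv.1
      type_tree.insert kv.1
        ((parent_tree.foldl
            (fun d p => d.insert p (lookupTP typepaths p))
            PySem.Dict.empty).items))
    PySem.Dict.empty).items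

-- ===== PORT B =====
-- ann(path): {path: typepaths.get(path, []), **ann(parent)} — recursion totalised by the same fuel
def annB (typepaths : List (String × List String)) : Nat → String → PySem.Dict String (List String)
  | 0, path => PySem.Dict.empty.insert path (lookupTP typepaths path)
  | fuel + 1, path =>
    let parent := parentStep path
    if parent = "" then PySem.Dict.empty.insert path (lookupTP typepaths path)
    else
      ((annB typepaths fuel parent).items).foldl
        (fun d kv => d.insert kv.1 kv.2)
        (PySem.Dict.empty.insert path (lookupTP typepaths path))

def generate_annotated_type_tree_alt (typepaths : List (String × List String)) : List (String × List (String × List String)) :=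
  (typepaths.foldl
    (fun tr kv => tr.insert kv.1 (annB typepaths ((PySem.Str.len kv.1).toNat + 16) kv.1).items)
    PySem.Dict.empty).items

-- ===== PRECONDITION & SPEC =====
def Spec_generate_annotated_type_tree (typepaths : List (String × List String)) (out : List (String × List (String × List String))) : Prop := out = generate_annotated_type_tree_alt typepaths
instance (typepaths : List (String × List String)) (out : List (String × List (String × List String))) : Decidable (Spec_generate_annotated_type_tree typepaths out) := by unfold Spec_generate_annotated_type_tree; infer_instance

-- ===== CLAIM (what is proved, stated in full; the proofs are below) =====
def Claim_equal_generate_annotated_type_tree : Prop := ∀ (typepaths : List (String × List String)), Dom_generate_annotated_type_tree typepaths → Spec_generate_annotated_type_tree typepaths (generate_annotated_type_tree typepaths)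

-- ===== LEMMAS AND PROOFS =====

-- the tail of the ancestor chain of p under fuel f (proof-side description of both loops)
def tailP : Nat → String → List String
  | 0, _ => []
  | f + 1, p =>
    let q := parentStep p
    if q = "" then [] else q :: tailP f q

theorem gptLoop_eq_append : ∀ (f : Nat) (p : String) (acc : List String),
    gptLoop f p acc = acc ++ tailP f p := by
  intro f
  induction f with
  | zero => intro p acc; simp [gptLoop, tailP]
  | succ f ih =>
    intro p acc
    simp only [gptLoop, tailP]
    split
    · simp
    · rw [ih, List.append_assoc]; rfl

-- gInv: every stored value is the lookup of its key
def gInv (typepaths : List (String × List String)) (d : PySem.Dict String (List String)) : Prop :=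
  ∀ p ∈ d.items, p.2 = lookupTP typepaths p.1

theorem gInv_empty (typepaths : List (String × List String)) :
    gInv typepaths PySem.Dict.empty := by
  intro p hp
  simp [PySem.Dict.empty] at hp

theorem gInv_insert {typepaths : List (String × List String)}
    {d : PySem.Dict String (List String)} (h : gInv typepaths d) (k : String) :
    gInv typepaths (d.insert k (lookupTP typepaths k)) := by
  intro p hp
  rcases (PySem.Dict.mem_items_insert _ _ _ _).1 hp with h1 | h2
  · subst h1; rfl
  · exact h p h2.1

theorem gInv_insert_pair {typepaths : List (String × List String)}
    {d : PySem.Dict String (List String)} (h : gInv typepaths d)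
    {kv : String × List String} (hkv : kv.2 = lookupTP typepaths kv.1) :
    gInv typepaths (d.insert kv.1 kv.2) := by
  rw [hkv]; exact gInv_insert h kv.1

theorem gInv_foldl_insKV {typepaths : List (String × List String)} :
    ∀ (l : List (String × List String)) (d : PySem.Dict String (List String)),
      gInv typepaths d → (∀ p ∈ l, p.2 = lookupTP typepaths p.1) →
      gInv typepaths (l.foldl (fun d kv => d.insert kv.1 kv.2) d) := by
  intro l
  induction l with
  | nil => intro d hd _; simpa using hd
  | cons x l ih =>
    intro d hd hl
    simp only [List.foldl_cons]
    exact ih _ (gInv_insert_pair hd (hl x (by simp))) (fun p hp => hl p (by simp [hp]))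

-- inserting the key's own lookup into a gInv dict that already contains the key changes nothing
theorem insert_noop {typepaths : List (String × List String)}
    {d : PySem.Dict String (List String)} (h : gInv typepaths d) {x : String}
    (hx : d.contains x = true) :
    d.insert x (lookupTP typepaths x) = d := by
  apply PySem.Dict.ext
  rw [PySem.Dict.items_insert_of_contains d (lookupTP typepaths x) hx]
  have : ∀ p ∈ d.items, (if p.1 == x then (x, lookupTP typepaths x) else p) = p := by
    intro p hp
    by_cases hpx : p.1 = x
    · simp only [hpx, beq_self_eq_true, if_pos]
      have := h p hp
      rw [← hpx, ← this]
    · simp [hpx]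
  rw [List.map_congr_left this]; simp

theorem contains_foldl_insKV {κ ν : Type} [BEq κ] [LawfulBEq κ]
    (l : List (κ × ν)) (d : PySem.Dict κ ν) (x : κ) (hx : d.contains x = true) :
    (l.foldl (fun d kv => d.insert kv.1 kv.2) d).contains x = true := by
  induction l generalizing d with
  | nil => simpa using hx
  | cons kv l ih =>
    simp only [List.foldl_cons]
    exact ih _ (by rw [PySem.Dict.contains_insert, hx]; simp)

-- the step of lemma G: folding the items of (d0.insert x (g x)) equals folding d0's items then inserting
theorem foldl_items_insert {typepaths : List (String × List String)}
    (d0 d : PySem.Dict String (List String)) (x : String)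
    (h0 : gInv typepaths d0) (hd : gInv typepaths d) :
    ((d0.insert x (lookupTP typepaths x)).items).foldl (fun d kv => d.insert kv.1 kv.2) d
      = ((d0.items).foldl (fun d kv => d.insert kv.1 kv.2) d).insert x (lookupTP typepaths x) := by
  by_cases hc : d0.contains x = true
  · rw [insert_noop h0 hc]
    have hD : gInv typepaths ((d0.items).foldl (fun d kv => d.insert kv.1 kv.2) d) :=
      gInv_foldl_insKV _ _ hd h0
    have hcx : ((d0.items).foldl (fun d kv => d.insert kv.1 kv.2) d).contains x = true := by
      have hk : x ∈ d0.items.map Prod.fst := by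
        simpa [PySem.Dict.keys] using (PySem.Dict.contains_iff_mem_keys d0 x).1 hc
      rcases List.mem_map.1 hk with ⟨p, hp, hpx⟩
      rcases List.append_of_mem hp with ⟨s, t, hst⟩
      rw [hst, List.foldl_append]
      simp only [List.foldl_cons]
      rw [← hpx]
      exact contains_foldl_insKV t _ p.1
        (by rw [PySem.Dict.contains_insert]; simp)
    rw [insert_noop hD hcx]
  · rw [PySem.Dict.items_insert_of_not_contains d0 (lookupTP typepaths x) (by simpa using hc),
        List.foldl_append]
    rfl

-- lemma G: unpacking a g-consistent dict built by a fold equals performing the fold directly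
theorem unpack_fold {typepaths : List (String × List String)} :
    ∀ (l : List String) (d0 d : PySem.Dict String (List String)),
      gInv typepaths d0 → gInv typepaths d →
      ((l.foldl (fun d q => d.insert q (lookupTP typepaths q)) d0).items).foldl
          (fun d kv => d.insert kv.1 kv.2) d
        = l.foldl (fun d q => d.insert q (lookupTP typepaths q))
            ((d0.items).foldl (fun d kv => d.insert kv.1 kv.2) d) := by
  intro l
  induction l with
  | nil => intro d0 d _ _; rfl
  | cons x l ih =>
    intro d0 d h0 hd
    simp only [List.foldl_cons]
    rw [ih _ _ (gInv_insert h0 x) hd, foldl_items_insert d0 d x h0 hd]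

theorem annB_eq_foldl (typepaths : List (String × List String)) :
    ∀ (f : Nat) (p : String),
      annB typepaths f p
        = (tailP f p).foldl (fun d q => d.insert q (lookupTP typepaths q))
            (PySem.Dict.empty.insert p (lookupTP typepaths p)) := by
  intro f
  induction f with
  | zero => intro p; simp [annB, tailP]
  | succ f ih =>
    intro p
    simp only [annB, tailP]
    split
    · rfl
    · rw [ih]
      rw [unpack_fold (tailP f (parentStep p)) _ _
            (gInv_insert (gInv_empty typepaths) _)
            (gInv_insert (gInv_empty typepaths) _)]
      rfl

theorem inner_eq (typepaths : List (String × List String)) (p : String) :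
    ((get_parent_tree p).foldl
        (fun d q => d.insert q (lookupTP typepaths q)) PySem.Dict.empty)
      = annB typepaths ((PySem.Str.len p).toNat + 16) p := by
  rw [annB_eq_foldl, get_parent_tree, gptLoop_eq_append]
  rfl

-- ===== VERDICT (by name: the statement is the Claim_ definition above) =====
theorem generate_annotated_type_tree_spec : Claim_equal_generate_annotated_type_tree := by
  intro typepaths _
  unfold Spec_generate_annotated_type_tree generate_annotated_type_tree generate_annotated_type_tree_alt
  congr 1
  apply PySem.List.foldl_congr_mem
  intro tr kv _
  exact congrArg (fun d => tr.insert kv.1 (PySem.Dict.items d)) (inner_eq typepaths kv.1)
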